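-- pv_equiv track=rewrite | github.com/Ehsan-Khademi/pac_man- | pac_man.py | apply_sequence_of_movements
-- ===== SOURCE A (Python) =====
-- def apply_sequence_of_movements(map, sequence_of_movements,initialize_map,start):
--     s=list(start)
--     for move in sequence_of_movements:
--         if map[s[0]][s[1]] == '-':
--           initialize_map[s[0]][s[1]] = '-'
--         elif map[s[0]][s[1]] == '*':
--           initialize_map[s[0]][s[1]] = '*'
--         elif map[s[0]][s[1]] == 'a':
--           initialize_map[s[0]][s[1]] = '-'
--         else:
--           initialize_map[s[0]][s[1]] = 'f'
--         change_pos(move,s)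
--
--     return initialize_map
--
-- def change_pos(move,current_location):
--         if   move == 2:
--             current_location[1]+=1
--         elif move == 4:
--             current_location[1]-=1
--         elif move == 1:
--             current_location[0]-=1
--         else:
--           current_location[0] +=1
--         return current_location
-- ===== SOURCE B (Python) =====
-- def apply_sequence_of_movements(map, sequence_of_movements, initialize_map, start):
--     # Phase 1: record the position visited before each move.
--     path = []
--     r, c = start
--     for move in sequence_of_movements:
--         path.append((r, c))
--         if move == 2:
--             c += 1
--         elif move == 4:
--             c -= 1
--         elif move == 1:
--             r -= 1
--         else:
--             r += 1
--     # Phase 2: mark every recorded position on the grid.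
--     for r, c in path:
--         cell = map[r][c]
--         initialize_map[r][c] = cell if cell in ('-', '*') else ('-' if cell == 'a' else 'f')
--     return initialize_map
-- ===== Notes on version B (the rewrite author's own statement) =====
-- stated objective: alternative
-- what changed: A interleaves marking and moving in one stateful loop; B splits the task into two passes: first it folds the move sequence into the explicit list of visited positions, then it marks those positions on the grid; Pre_ excludes only inputs on which A raises IndexError (a visited position outside Python's valid index range of either grid).
import Mathlib
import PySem

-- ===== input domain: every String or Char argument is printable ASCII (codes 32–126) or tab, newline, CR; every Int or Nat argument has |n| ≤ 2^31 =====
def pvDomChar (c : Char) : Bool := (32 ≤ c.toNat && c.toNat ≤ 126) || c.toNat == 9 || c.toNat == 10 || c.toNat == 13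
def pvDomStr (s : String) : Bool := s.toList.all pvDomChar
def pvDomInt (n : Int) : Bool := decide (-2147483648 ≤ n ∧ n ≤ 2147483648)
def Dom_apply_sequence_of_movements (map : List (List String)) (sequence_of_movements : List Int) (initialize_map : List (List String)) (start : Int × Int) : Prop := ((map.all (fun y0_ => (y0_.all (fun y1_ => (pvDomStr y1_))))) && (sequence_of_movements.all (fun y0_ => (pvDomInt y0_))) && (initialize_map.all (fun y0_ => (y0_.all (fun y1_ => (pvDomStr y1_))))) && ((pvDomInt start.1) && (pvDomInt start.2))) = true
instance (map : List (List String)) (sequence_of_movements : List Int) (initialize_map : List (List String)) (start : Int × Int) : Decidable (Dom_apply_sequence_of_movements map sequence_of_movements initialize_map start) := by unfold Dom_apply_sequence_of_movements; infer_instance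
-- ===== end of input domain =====

-- B replaces A's single stateful mark-and-move loop by two passes (collect the visited
-- positions, then mark them); equivalence is about the returned value — both Pythons
-- mutate initialize_map in place.

-- ===== PORT A =====
def change_pos (move : Int) (s : Int × Int) : Int × Int :=
  if move = 2 then (s.1, s.2 + 1)
  else if move = 4 then (s.1, s.2 - 1)
  else if move = 1 then (s.1 - 1, s.2)
  else (s.1 + 1, s.2)

def apply_sequence_of_movements (map : List (List String)) (sequence_of_movements : List Int) (initialize_map : List (List String)) (start : Int × Int) : List (List String) :=
  (sequence_of_movements.foldl
    (fun (st : List (List String) × (Int × Int)) move =>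
      let im := st.1
      let s := st.2
      let cell := PySem.List.pyGetD (PySem.List.pyGetD map s.1 []) s.2 ""
      let v := if cell = "-" then "-" else if cell = "*" then "*"
               else if cell = "a" then "-" else "f"
      (PySem.List.pySetD im s.1 (PySem.List.pySetD (PySem.List.pyGetD im s.1 []) s.2 v),
       change_pos move s))
    (initialize_map, (start.1, start.2))).1

-- ===== PORT B =====
-- Phase 1 of Source B: the list of positions visited before each move.
def pvPathB : List Int → Int → Int → List (Int × Int)
  | [], _, _ => []
  | m :: ms, r, c =>
    (r, c) ::
      (if m = 2 then pvPathB ms r (c + 1)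
       else if m = 4 then pvPathB ms r (c - 1)
       else if m = 1 then pvPathB ms (r - 1) c
       else pvPathB ms (r + 1) c)

-- the conditional expression in Source B's phase 2
def pvMark (cell : String) : String :=
  if cell = "-" ∨ cell = "*" then cell else if cell = "a" then "-" else "f"

def apply_sequence_of_movements_alt (map : List (List String)) (sequence_of_movements : List Int) (initialize_map : List (List String)) (start : Int × Int) : List (List String) :=
  (pvPathB sequence_of_movements start.1 start.2).foldl
    (fun grid p =>
      let cell := PySem.List.pyGetD (PySem.List.pyGetD map p.1 []) p.2 ""
      PySem.List.pySetD grid p.1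
        (PySem.List.pySetD (PySem.List.pyGetD grid p.1 []) p.2 (pvMark cell)))
    initialize_map

-- ===== PRECONDITION & SPEC =====
-- Pre_ excludes exactly the inputs on which the Python A raises IndexError: the
-- position visited before move i (start shifted by the prefix counts of the move
-- codes) must lie in the valid (possibly negative) Python index range of both grids.
def Pre_apply_sequence_of_movements (map : List (List String)) (sequence_of_movements : List Int) (initialize_map : List (List String)) (start : Int × Int) : Prop :=
  ∀ i ∈ List.range sequence_of_movements.length,
    let pre := sequence_of_movements.take i
    let r := start.1 + (pre.countP (fun m => !(m == 1 || m == 2 || m == 4)) : Int) - (pre.count 1 : Int)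
    let c := start.2 + (pre.count 2 : Int) - (pre.count 4 : Int)
    PySem.Raise.InRange map.length r ∧
    PySem.Raise.InRange (PySem.List.pyGetD map r []).length c ∧
    PySem.Raise.InRange initialize_map.length r ∧
    PySem.Raise.InRange (PySem.List.pyGetD initialize_map r []).length c

instance (map : List (List String)) (sequence_of_movements : List Int) (initialize_map : List (List String)) (start : Int × Int) : Decidable (Pre_apply_sequence_of_movements map sequence_of_movements initialize_map start) := by
  unfold Pre_apply_sequence_of_movements PySem.Raise.InRange; infer_instance

def pvWitness_apply_sequence_of_movements : List (List String) × List Int × List (List String) × (Int × Int) :=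
  ([["a", "*"], ["x", "-"]], [2, 3, 4], [["?", "?"], ["?", "?"]], (0, 0))

def Spec_apply_sequence_of_movements (map : List (List String)) (sequence_of_movements : List Int) (initialize_map : List (List String)) (start : Int × Int) (out : List (List String)) : Prop := out = apply_sequence_of_movements_alt map sequence_of_movements initialize_map start
instance (map : List (List String)) (sequence_of_movements : List Int) (initialize_map : List (List String)) (start : Int × Int) (out : List (List String)) : Decidable (Spec_apply_sequence_of_movements map sequence_of_movements initialize_map start out) := by unfold Spec_apply_sequence_of_movements; infer_instance

-- ===== CLAIM (what is proved, stated in full; the proofs are below) =====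
def Claim_equal_apply_sequence_of_movements : Prop := ∀ (map : List (List String)) (sequence_of_movements : List Int) (initialize_map : List (List String)) (start : Int × Int), Dom_apply_sequence_of_movements map sequence_of_movements initialize_map start → Pre_apply_sequence_of_movements map sequence_of_movements initialize_map start → Spec_apply_sequence_of_movements map sequence_of_movements initialize_map start (apply_sequence_of_movements map sequence_of_movements initialize_map start)

-- ===== LEMMAS AND PROOFS =====

lemma mark_eq (cell : String) :
    (if cell = "-" then "-" else if cell = "*" then "*"
     else if cell = "a" then "-" else "f") = pvMark cell := by
  unfold pvMark
  by_cases h1 : cell = "-" <;> by_cases h2 : cell = "*" <;> simp [h1, h2]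

lemma loop_eq (map : List (List String)) :
    ∀ (seq : List Int) (r c : Int) (im : List (List String)),
    (seq.foldl
      (fun (st : List (List String) × (Int × Int)) move =>
        let cur := st.1
        let s := st.2
        let cell := PySem.List.pyGetD (PySem.List.pyGetD map s.1 []) s.2 ""
        let v := if cell = "-" then "-" else if cell = "*" then "*"
                 else if cell = "a" then "-" else "f"
        (PySem.List.pySetD cur s.1 (PySem.List.pySetD (PySem.List.pyGetD cur s.1 []) s.2 v),
         change_pos move s))
      (im, (r, c))).1 =
    (pvPathB seq r c).foldl
      (fun grid p =>
        let cell := PySem.List.pyGetD (PySem.List.pyGetD map p.1 []) p.2 ""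
        PySem.List.pySetD grid p.1
          (PySem.List.pySetD (PySem.List.pyGetD grid p.1 []) p.2 (pvMark cell)))
      im := by
  intro seq
  induction seq with
  | nil => intro r c im; rfl
  | cons m ms ih =>
    intro r c im
    simp only [List.foldl_cons, pvPathB]
    rw [mark_eq]
    unfold change_pos
    split_ifs with h2 h4 h1 <;> exact ih _ _ _

-- ===== VERDICT (by name: the statement is the Claim_ definition above) =====
theorem apply_sequence_of_movements_spec : Claim_equal_apply_sequence_of_movements := by
  intro map seq im start _ _
  unfold Spec_apply_sequence_of_movements apply_sequence_of_movements apply_sequence_of_movements_alt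
  exact loop_eq map seq start.1 start.2 im
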